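-- pv_equiv track=rewrite | github.com/CapritaAndrei/CompanyClassifier4.0 | classifyByOriginalBusinessTags.py | _are_related_sectors
-- ===== SOURCE A (Python) =====
-- def _are_related_sectors(sector1: str, sector2: str) -> bool:
--     """Check if two sectors are related/compatible"""
--
--     # Define related sector groups
--     related_groups = [
--         ['manufacturing', 'wholesale'],  # Manufacturers often wholesale
--         ['services', 'retail'],          # Services and retail often overlap
--         ['manufacturing', 'services'],   # Some manufacturing includes services
--     ]
--
--     sector1 = sector1.lower()
--     sector2 = sector2.lower()
--
--     for group in related_groups:
--         if sector1 in group and sector2 in group: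
--             return True
--
--     return False
-- ===== SOURCE B (Python) =====
-- def _are_related_sectors(sector1: str, sector2: str) -> bool:
--     """Check if two sectors are related/compatible"""
--     related_groups = [
--         ['manufacturing', 'wholesale'],
--         ['services', 'retail'],
--         ['manufacturing', 'services'],
--     ]
--     # Build the set of all ordered pairs within each group (self-pairs included),
--     # then answer with a single membership test.
--     related_pairs = {(a, b) for group in related_groups for a in group for b in group}
--     return (sector1.lower(), sector2.lower()) in related_pairs
-- ===== Notes on version B (the rewrite author's own statement) =====
-- stated objective: alternative
-- what changed: B builds a set of all ordered within-group pairs (including self-pairs) once and answers with a single pair-membership test, instead of A's per-group loop with two list membership scans and an early return.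
import Mathlib
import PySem

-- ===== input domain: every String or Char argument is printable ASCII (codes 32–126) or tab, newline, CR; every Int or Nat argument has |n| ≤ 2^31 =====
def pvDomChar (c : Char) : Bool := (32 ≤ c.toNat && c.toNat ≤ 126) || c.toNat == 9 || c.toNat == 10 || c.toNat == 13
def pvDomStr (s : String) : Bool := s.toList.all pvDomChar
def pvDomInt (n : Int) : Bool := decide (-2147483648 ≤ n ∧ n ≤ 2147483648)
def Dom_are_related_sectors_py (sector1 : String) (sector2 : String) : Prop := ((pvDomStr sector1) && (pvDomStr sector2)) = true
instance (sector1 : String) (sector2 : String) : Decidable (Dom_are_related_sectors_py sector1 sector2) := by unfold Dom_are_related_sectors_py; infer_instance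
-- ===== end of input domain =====

-- B replaces A's per-group loop with a prebuilt set of ordered within-group pairs and one membership test (alternative decomposition, same cost).


-- ===== PORT A =====
def are_related_sectors_py_loop (s1 s2 : String) : List (List String) → Bool
  | [] => false
  | g :: rest =>
    if g.contains s1 && g.contains s2 then true
    else are_related_sectors_py_loop s1 s2 rest

-- Literal port of A: lowercase both, then loop over the groups with an early return.
def are_related_sectors_py (sector1 : String) (sector2 : String) : Bool :=
  let related_groups : List (List String) :=
    [["manufacturing", "wholesale"], ["services", "retail"], ["manufacturing", "services"]]
  let s1 := PySem.Str.lower sector1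
  let s2 := PySem.Str.lower sector2
  are_related_sectors_py_loop s1 s2 related_groups

-- ===== PORT B =====
-- Literal port of B: build the set of all ordered within-group pairs, one membership test.
def are_related_sectors_py_alt (sector1 : String) (sector2 : String) : Bool :=
  let related_groups : List (List String) :=
    [["manufacturing", "wholesale"], ["services", "retail"], ["manufacturing", "services"]]
  let related_pairs : PySem.Set (String × String) :=
    PySem.Set.ofList (related_groups.flatMap (fun g => g.flatMap (fun a => g.map (fun b => (a, b)))))
  PySem.Set.contains related_pairs (PySem.Str.lower sector1, PySem.Str.lower sector2)

-- ===== PRECONDITION & SPEC =====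
def Spec_are_related_sectors_py (sector1 : String) (sector2 : String) (out : Bool) : Prop := out = are_related_sectors_py_alt sector1 sector2
instance (sector1 : String) (sector2 : String) (out : Bool) : Decidable (Spec_are_related_sectors_py sector1 sector2 out) := by unfold Spec_are_related_sectors_py; infer_instance

-- ===== CLAIM (what is proved, stated in full; the proofs are below) =====
def Claim_equal_are_related_sectors_py : Prop := ∀ (sector1 : String) (sector2 : String), Dom_are_related_sectors_py sector1 sector2 → Spec_are_related_sectors_py sector1 sector2 (are_related_sectors_py sector1 sector2)

-- ===== LEMMAS AND PROOFS =====

-- ===== VERDICT (by name: the statement is the Claim_ definition above) =====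
-- Both ports reduce to the same Boolean formula over four string-equality tests on the lowercased inputs.
theorem are_related_sectors_py_spec : Claim_equal_are_related_sectors_py := by
  intro sector1 sector2 _
  unfold Spec_are_related_sectors_py
  unfold are_related_sectors_py are_related_sectors_py_alt are_related_sectors_py_loop
  simp [PySem.Set.ofList, PySem.Set.add, PySem.Set.contains, List.contains_eq_mem,
        Prod.ext_iff]
  generalize PySem.Str.lower sector1 = a
  generalize PySem.Str.lower sector2 = b
  by_cases h1 : a = "manufacturing" <;> by_cases h2 : a = "wholesale" <;>
    by_cases h3 : a = "services" <;> by_cases h4 : a = "retail" <;>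
    by_cases k1 : b = "manufacturing" <;> by_cases k2 : b = "wholesale" <;>
    by_cases k3 : b = "services" <;> by_cases k4 : b = "retail" <;>
    simp_all [are_related_sectors_py_loop]
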